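-- pv_equiv track=rewrite | github.com/bryanwhl/clonevault | agents/digital_twin_agent.py | _identify_missing_career_info
-- ===== SOURCE A (Python) =====
-- from typing import Dict, Any, List, Optional, TypedDict
--
-- def _identify_missing_career_info(messages: List[Dict[str, str]], user_profile: Dict[str, Any]) -> List[str]:
--     """Identify what career information hasn't been shared yet"""
--     mentioned_topics = set()
--     for msg in messages:
--         if msg.get("role") == "user":
--             content = msg.get("content", "").lower()
--             if any(word in content for word in ["work", "job", "company", "role"]):
--                 mentioned_topics.add("current_role")
--             if any(word in content for word in ["studied", "university", "degree", "school"]):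
--                 mentioned_topics.add("education")
--             if any(word in content for word in ["skill", "technology", "programming", "language"]):
--                 mentioned_topics.add("skills")
--             if any(word in content for word in ["project", "built", "created", "developed"]):
--                 mentioned_topics.add("projects")
--
--     missing_info = []
--     if "current_role" not in mentioned_topics:
--         missing_info.append("current_role_and_company")
--     if "education" not in mentioned_topics:
--         missing_info.append("educational_background")
--     if "skills" not in mentioned_topics:
--         missing_info.append("technical_skills")
--     if "projects" not in mentioned_topics:
--         missing_info.append("interesting_projects")
--
--     return missing_info[:2]  # Focus on top 2 missing areas
-- ===== SOURCE B (Python) =====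
-- def _identify_missing_career_info(messages, user_profile):
--     """Identify what career information hasn't been shared yet"""
--     topics = [
--         ("current_role_and_company", ["work", "job", "company", "role"]),
--         ("educational_background", ["studied", "university", "degree", "school"]),
--         ("technical_skills", ["skill", "technology", "programming", "language"]),
--         ("interesting_projects", ["project", "built", "created", "developed"]),
--     ]
--     missing = [label for label, kws in topics
--                if not any(kw in msg.get("content", "").lower()
--                           for msg in messages if msg.get("role") == "user"
--                           for kw in kws)]
--     return missing[:2]
-- ===== Notes on version B (the rewrite author's own statement) =====
-- stated objective: alternative
-- what changed: Replaces A's single forward pass that accumulates a mentioned-topics set (then four membership checks) with a (label, keywords) table and a per-topic rescan of the user messages via a list comprehension.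
import Mathlib
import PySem

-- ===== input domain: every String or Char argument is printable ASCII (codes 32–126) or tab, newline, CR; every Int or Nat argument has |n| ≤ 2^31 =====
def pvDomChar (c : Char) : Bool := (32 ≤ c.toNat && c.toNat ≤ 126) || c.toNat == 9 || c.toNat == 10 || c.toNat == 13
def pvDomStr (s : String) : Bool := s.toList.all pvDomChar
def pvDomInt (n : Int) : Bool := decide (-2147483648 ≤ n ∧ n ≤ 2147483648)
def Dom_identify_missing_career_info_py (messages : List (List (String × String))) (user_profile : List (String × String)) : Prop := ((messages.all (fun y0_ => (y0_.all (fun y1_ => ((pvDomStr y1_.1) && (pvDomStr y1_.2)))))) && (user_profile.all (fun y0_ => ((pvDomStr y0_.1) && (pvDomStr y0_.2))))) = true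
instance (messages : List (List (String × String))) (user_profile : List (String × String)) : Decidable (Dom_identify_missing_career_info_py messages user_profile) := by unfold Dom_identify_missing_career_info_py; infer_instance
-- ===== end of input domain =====

-- ===== PORT A =====
-- B rescans the messages once per topic from a (label, keywords) table instead of A's
-- single pass that builds a mentioned-topics set; same cost, different decomposition (return-value equivalence).

-- loop body of A's 'for msg in messages' pass
def pvStep (s : PySem.Set String) (msg : List (String × String)) : PySem.Set String :=
  if PySem.Dict.get? (PySem.Dict.mk msg) "role" == some "user" then
    let content := PySem.Str.lower (PySem.Dict.getD (PySem.Dict.mk msg) "content" "")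
    let s := if ["work", "job", "company", "role"].any (fun w => PySem.Str.isIn w content) then s.add "current_role" else s
    let s := if ["studied", "university", "degree", "school"].any (fun w => PySem.Str.isIn w content) then s.add "education" else s
    let s := if ["skill", "technology", "programming", "language"].any (fun w => PySem.Str.isIn w content) then s.add "skills" else s
    let s := if ["project", "built", "created", "developed"].any (fun w => PySem.Str.isIn w content) then s.add "projects" else s
    s
  else s

def identify_missing_career_info_py (messages : List (List (String × String))) (user_profile : List (String × String)) : List String :=
  let mentioned_topics : PySem.Set String := messages.foldl pvStep PySem.Set.empty
  let missing_info : List String := []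
  let missing_info := if !(mentioned_topics.contains "current_role") then missing_info ++ ["current_role_and_company"] else missing_info
  let missing_info := if !(mentioned_topics.contains "education") then missing_info ++ ["educational_background"] else missing_info
  let missing_info := if !(mentioned_topics.contains "skills") then missing_info ++ ["technical_skills"] else missing_info
  let missing_info := if !(mentioned_topics.contains "projects") then missing_info ++ ["interesting_projects"] else missing_info
  PySem.List.slice missing_info none (some 2)

-- ===== PORT B =====
def pvTopics : List (String × List String) :=
  [("current_role_and_company", ["work", "job", "company", "role"]),
   ("educational_background", ["studied", "university", "degree", "school"]),
   ("technical_skills", ["skill", "technology", "programming", "language"]),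
   ("interesting_projects", ["project", "built", "created", "developed"])]

def identify_missing_career_info_py_alt (messages : List (List (String × String))) (user_profile : List (String × String)) : List String :=
  let missing : List String :=
    (pvTopics.filter (fun t =>
      !(messages.any (fun msg =>
        (PySem.Dict.get? (PySem.Dict.mk msg) "role" == some "user") &&
        t.2.any (fun kw => PySem.Str.isIn kw (PySem.Str.lower (PySem.Dict.getD (PySem.Dict.mk msg) "content" ""))))))).map Prod.fst
  PySem.List.slice missing none (some 2)

-- ===== PRECONDITION & SPEC =====
def Spec_identify_missing_career_info_py (messages : List (List (String × String))) (user_profile : List (String × String)) (out : List String) : Prop := out = identify_missing_career_info_py_alt messages user_profile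
instance (messages : List (List (String × String))) (user_profile : List (String × String)) (out : List String) : Decidable (Spec_identify_missing_career_info_py messages user_profile out) := by unfold Spec_identify_missing_career_info_py; infer_instance

-- ===== CLAIM (what is proved, stated in full; the proofs are below) =====
def Claim_equal_identify_missing_career_info_py : Prop := ∀ (messages : List (List (String × String))) (user_profile : List (String × String)), Dom_identify_missing_career_info_py messages user_profile → Spec_identify_missing_career_info_py messages user_profile (identify_missing_career_info_py messages user_profile)

-- ===== LEMMAS AND PROOFS =====
-- does some user message mention one of the keywords?
def pvHit (kws : List String) (messages : List (List (String × String))) : Bool :=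
  messages.any (fun msg =>
    (PySem.Dict.get? (PySem.Dict.mk msg) "role" == some "user") &&
    kws.any (fun kw => PySem.Str.isIn kw (PySem.Str.lower (PySem.Dict.getD (PySem.Dict.mk msg) "content" ""))))

theorem pv_contains_add (s : PySem.Set String) (x y : String) :
    (s.add x).contains y = (s.contains y || y == x) := by
  by_cases h : y = x
  · subst h
    simp [PySem.Set.mem_add]
  · simp only [PySem.Set.add]
    split_ifs with hc
    · simp [h]
    · simp [h]

theorem pv_step_contains_1 (s : PySem.Set String) (msg : List (String × String)) :
    (pvStep s msg).contains "current_role" = (s.contains "current_role" ||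
      ((PySem.Dict.get? (PySem.Dict.mk msg) "role" == some "user") &&
       (["work", "job", "company", "role"] : List String).any (fun kw => PySem.Str.isIn kw (PySem.Str.lower (PySem.Dict.getD (PySem.Dict.mk msg) "content" ""))))) := by
  simp only [pvStep]
  split_ifs with h1 h2 h3 h4 h5 <;> simp_all [pv_contains_add]

theorem pv_fold_contains_1 (messages : List (List (String × String))) (s : PySem.Set String) :
    (messages.foldl pvStep s).contains "current_role" = (s.contains "current_role" || pvHit (["work", "job", "company", "role"] : List String) messages) := by
  induction messages generalizing s with
  | nil => simp [pvHit]
  | cons m t ih =>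
    rw [List.foldl_cons, ih, pv_step_contains_1]
    simp only [pvHit, List.any_cons, Bool.or_assoc]

theorem pv_step_contains_2 (s : PySem.Set String) (msg : List (String × String)) :
    (pvStep s msg).contains "education" = (s.contains "education" ||
      ((PySem.Dict.get? (PySem.Dict.mk msg) "role" == some "user") &&
       (["studied", "university", "degree", "school"] : List String).any (fun kw => PySem.Str.isIn kw (PySem.Str.lower (PySem.Dict.getD (PySem.Dict.mk msg) "content" ""))))) := by
  simp only [pvStep]
  split_ifs with h1 h2 h3 h4 h5 <;> simp_all [pv_contains_add]

theorem pv_fold_contains_2 (messages : List (List (String × String))) (s : PySem.Set String) :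
    (messages.foldl pvStep s).contains "education" = (s.contains "education" || pvHit (["studied", "university", "degree", "school"] : List String) messages) := by
  induction messages generalizing s with
  | nil => simp [pvHit]
  | cons m t ih =>
    rw [List.foldl_cons, ih, pv_step_contains_2]
    simp only [pvHit, List.any_cons, Bool.or_assoc]

theorem pv_step_contains_3 (s : PySem.Set String) (msg : List (String × String)) :
    (pvStep s msg).contains "skills" = (s.contains "skills" ||
      ((PySem.Dict.get? (PySem.Dict.mk msg) "role" == some "user") &&
       (["skill", "technology", "programming", "language"] : List String).any (fun kw => PySem.Str.isIn kw (PySem.Str.lower (PySem.Dict.getD (PySem.Dict.mk msg) "content" ""))))) := by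
  simp only [pvStep]
  split_ifs with h1 h2 h3 h4 h5 <;> simp_all [pv_contains_add]

theorem pv_fold_contains_3 (messages : List (List (String × String))) (s : PySem.Set String) :
    (messages.foldl pvStep s).contains "skills" = (s.contains "skills" || pvHit (["skill", "technology", "programming", "language"] : List String) messages) := by
  induction messages generalizing s with
  | nil => simp [pvHit]
  | cons m t ih =>
    rw [List.foldl_cons, ih, pv_step_contains_3]
    simp only [pvHit, List.any_cons, Bool.or_assoc]

theorem pv_step_contains_4 (s : PySem.Set String) (msg : List (String × String)) :
    (pvStep s msg).contains "projects" = (s.contains "projects" ||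
      ((PySem.Dict.get? (PySem.Dict.mk msg) "role" == some "user") &&
       (["project", "built", "created", "developed"] : List String).any (fun kw => PySem.Str.isIn kw (PySem.Str.lower (PySem.Dict.getD (PySem.Dict.mk msg) "content" ""))))) := by
  simp only [pvStep]
  split_ifs with h1 h2 h3 h4 h5 <;> simp_all [pv_contains_add]

theorem pv_fold_contains_4 (messages : List (List (String × String))) (s : PySem.Set String) :
    (messages.foldl pvStep s).contains "projects" = (s.contains "projects" || pvHit (["project", "built", "created", "developed"] : List String) messages) := by
  induction messages generalizing s with
  | nil => simp [pvHit]
  | cons m t ih =>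
    rw [List.foldl_cons, ih, pv_step_contains_4]
    simp only [pvHit, List.any_cons, Bool.or_assoc]

-- ===== VERDICT (by name: the statement is the Claim_ definition above) =====
theorem identify_missing_career_info_py_spec : Claim_equal_identify_missing_career_info_py := by
  intro messages user_profile _
  unfold Spec_identify_missing_career_info_py
  simp only [identify_missing_career_info_py, identify_missing_career_info_py_alt, pvTopics,
    List.filter_cons, List.filter_nil]
  rw [pv_fold_contains_1, pv_fold_contains_2, pv_fold_contains_3, pv_fold_contains_4]
  simp only [pvHit, PySem.Set.empty, PySem.Set.contains, List.elem_nil, Bool.false_or]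
  generalize (messages.any (fun msg => (PySem.Dict.get? (PySem.Dict.mk msg) "role" == some "user") && (["work", "job", "company", "role"] : List String).any (fun kw => PySem.Str.isIn kw (PySem.Str.lower (PySem.Dict.getD (PySem.Dict.mk msg) "content" ""))))) = b1
  generalize (messages.any (fun msg => (PySem.Dict.get? (PySem.Dict.mk msg) "role" == some "user") && (["studied", "university", "degree", "school"] : List String).any (fun kw => PySem.Str.isIn kw (PySem.Str.lower (PySem.Dict.getD (PySem.Dict.mk msg) "content" ""))))) = b2
  generalize (messages.any (fun msg => (PySem.Dict.get? (PySem.Dict.mk msg) "role" == some "user") && (["skill", "technology", "programming", "language"] : List String).any (fun kw => PySem.Str.isIn kw (PySem.Str.lower (PySem.Dict.getD (PySem.Dict.mk msg) "content" ""))))) = b3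
  generalize (messages.any (fun msg => (PySem.Dict.get? (PySem.Dict.mk msg) "role" == some "user") && (["project", "built", "created", "developed"] : List String).any (fun kw => PySem.Str.isIn kw (PySem.Str.lower (PySem.Dict.getD (PySem.Dict.mk msg) "content" ""))))) = b4
  cases b1 <;> cases b2 <;> cases b3 <;> cases b4 <;> rfl
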